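-- pv_equiv track=rewrite | github.com/ALTA-DE2-Zelva-Imam-Kusumonegoro-UBQgJ/Algo-DS-Part2 | problem3/main.py | playing_domino
-- ===== SOURCE A (Python) =====
-- def playing_domino(cards, deck):
--     max_value = 0
--     for i in cards:
--         if i[0] == deck[1] or i[1] == deck[1]:
--             if max_value == 0 or max(i) > max(max_value):
--                 max_value = i
--     if max_value != 0:
--         return max_value
--     else:
--         return []
-- ===== SOURCE B (Python) =====
-- def playing_domino(cards, deck):
--     matches = [c for c in cards if c[0] == deck[1] or c[1] == deck[1]]
--     matches.sort(key=max, reverse=True)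
--     return matches[0] if matches else []
-- ===== Notes on version B (the rewrite author's own statement) =====
-- stated objective: idiomatic
-- what changed: Replaces the single selecting scan with a 0 sentinel and manual argmax by: build the match list with a comprehension, stable-sort it descending by max(card), return its first element (stability reproduces A's first-wins tie-breaking).
import Mathlib
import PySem

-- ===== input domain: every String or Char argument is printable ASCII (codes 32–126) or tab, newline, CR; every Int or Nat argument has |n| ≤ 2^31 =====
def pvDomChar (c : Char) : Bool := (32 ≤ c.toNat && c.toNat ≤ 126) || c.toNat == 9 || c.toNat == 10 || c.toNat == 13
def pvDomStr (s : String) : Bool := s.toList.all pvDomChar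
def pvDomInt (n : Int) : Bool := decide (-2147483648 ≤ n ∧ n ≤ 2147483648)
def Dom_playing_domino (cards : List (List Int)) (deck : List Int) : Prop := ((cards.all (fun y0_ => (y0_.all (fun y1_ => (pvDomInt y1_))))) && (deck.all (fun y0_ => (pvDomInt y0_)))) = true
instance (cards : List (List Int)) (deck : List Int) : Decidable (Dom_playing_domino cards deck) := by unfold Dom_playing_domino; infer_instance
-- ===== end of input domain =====

-- B builds the list of matching cards, sorts it stably by max(card) descending, and returns its first
-- element; A does a single selecting scan with a 0 sentinel. Equal return values on Pre_.

-- Python max(xs) on a nonempty list (first maximal element; the getD 0 default is never reached inside Pre_)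
def pyMax (xs : List Int) : Int := (PySem.List.max? xs (fun x => x)).getD 0

-- ===== PORT A =====
-- the inner update: 'if max_value == 0 or max(i) > max(max_value): max_value = i'
def maxStep (mv : Option (List Int)) (i : List Int) : Option (List Int) :=
  match mv with
  | none => some i
  | some m => if pyMax m < pyMax i then some i else some m

-- 'return max_value if max_value != 0 else []'
def unwrap (mv : Option (List Int)) : List Int :=
  match mv with
  | some m => m
  | none => []

def playing_domino (cards : List (List Int)) (deck : List Int) : List Int :=
  unwrap (cards.foldl (fun mv i =>
    if i.getD 0 0 = deck.getD 1 0 ∨ i.getD 1 0 = deck.getD 1 0 then maxStep mv i else mv) none)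

-- ===== PORT B =====
-- 'matches[0] if matches else []'
def firstOrEmpty (l : List (List Int)) : List Int :=
  match l with
  | c :: _ => c
  | [] => []

def playing_domino_alt (cards : List (List Int)) (deck : List Int) : List Int :=
  let ms := cards.filter (fun c => decide (c.getD 0 0 = deck.getD 1 0 ∨ c.getD 1 0 = deck.getD 1 0))
  firstOrEmpty (PySem.List.sorted ms pyMax true)

-- ===== PRECONDITION & SPEC =====
-- Pre_ excludes exactly the inputs on which A raises an IndexError: a deck shorter than 2 while some
-- card exists, an empty card, or a 1-element card whose only value misses deck[1] (i[1] is accessed).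
def Pre_playing_domino (cards : List (List Int)) (deck : List Int) : Prop :=
  cards = [] ∨ (2 ≤ deck.length ∧ ∀ c ∈ cards, c ≠ [] ∧ (c.getD 0 0 = deck.getD 1 0 ∨ 2 ≤ c.length))
instance (cards : List (List Int)) (deck : List Int) : Decidable (Pre_playing_domino cards deck) := by unfold Pre_playing_domino; infer_instance
def pvWitness_playing_domino : List (List Int) × List Int := ([[1, 2], [3, 1], [1]], [5, 1])

def Spec_playing_domino (cards : List (List Int)) (deck : List Int) (out : List Int) : Prop := out = playing_domino_alt cards deck
instance (cards : List (List Int)) (deck : List Int) (out : List Int) : Decidable (Spec_playing_domino cards deck out) := by unfold Spec_playing_domino; infer_instance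

-- ===== CLAIM (what is proved, stated in full; the proofs are below) =====
def Claim_equal_playing_domino : Prop := ∀ (cards : List (List Int)) (deck : List Int), Dom_playing_domino cards deck → Pre_playing_domino cards deck → Spec_playing_domino cards deck (playing_domino cards deck)

-- ===== LEMMAS AND PROOFS =====

-- head of insertBy with the descending comparator performs exactly one first-argmax step
theorem head_insertBy_rev (key : List Int → Int) (x : List Int) (acc : List (List Int)) :
    (PySem.List.insertBy (fun a b => decide (key b < key a)) x acc).head? =
      match acc.head? with
      | none => some x
      | some m => if key m < key x then some x else some m := by
  cases acc with
  | nil => simp [PySem.List.insertBy]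
  | cons y ys =>
      simp only [PySem.List.insertBy, List.head?_cons]
      split_ifs with h <;> simp_all

-- the head of the descending stable insertion-sort fold computes the first-argmax fold
theorem foldl_insertBy_head (key : List Int → Int) (xs : List (List Int)) (acc : List (List Int)) :
    (xs.foldl (fun a x => PySem.List.insertBy (fun a b => decide (key b < key a)) x a) acc).head? =
      xs.foldl (fun (o : Option (List Int)) x =>
        match o with
        | none => some x
        | some m => if key m < key x then some x else some m) acc.head? := by
  induction xs generalizing acc with
  | nil => rfl
  | cons x t ih =>
      simp only [List.foldl_cons]
      rw [ih, head_insertBy_rev]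

-- filter-then-sort-then-take-first equals the guarded single-scan argmax
theorem pick_eq_sort_head (q : List Int → Prop) [inst : DecidablePred q] (xs : List (List Int)) :
    unwrap (xs.foldl (fun mv i => if q i then maxStep mv i else mv) none) =
      firstOrEmpty (PySem.List.sorted (xs.filter (fun c => decide (q c))) pyMax true) := by
  have h := foldl_insertBy_head pyMax (xs.filter (fun c => decide (q c))) []
  rw [← PySem.List.sorted_rev_eq_foldl_insertBy, List.foldl_filter] at h
  have hfun : (fun (o : Option (List Int)) x =>
        if decide (q x) = true then
          (fun (o : Option (List Int)) x =>
            match o with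
            | none => some x
            | some m => if pyMax m < pyMax x then some x else some m) o x
        else o) =
      (fun (mv : Option (List Int)) i => if q i then maxStep mv i else mv) := by
    funext o x
    by_cases hq : q x <;> cases o <;> simp [hq, maxStep]
  rw [hfun] at h
  simp only [List.head?_nil] at h
  cases hF : xs.foldl (fun mv i => if q i then maxStep mv i else mv) none with
  | none =>
      rw [hF] at h
      rw [List.head?_eq_none_iff] at h
      rw [h]
      rfl
  | some m =>
      rw [hF] at h
      rw [List.head?_eq_some_iff] at h
      obtain ⟨t, ht⟩ := h
      rw [ht]
      rfl

-- ===== VERDICT (by name: the statement is the Claim_ definition above) =====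
theorem playing_domino_spec : Claim_equal_playing_domino := by
  intro cards deck _ _
  unfold Spec_playing_domino playing_domino playing_domino_alt
  exact pick_eq_sort_head (fun c => c.getD 0 0 = deck.getD 1 0 ∨ c.getD 1 0 = deck.getD 1 0) cards
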